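-- pv_equiv track=rewrite | github.com/jinhyun95/GACapsHTC | utils/metric.py | select_argmax_autoreg
-- ===== SOURCE A (Python) =====
-- def select_argmax_autoreg(prediction, probs, label_ids, paths):
--     best_p = None
--     check = None
--     for path in paths:
--         p = probs[path[1]]
--         if best_p is None or p > best_p:
--             best_p = p
--             check = path[1]
--     prediction[check] = True
--
--     best_p = None
--     check2 = None
--     for path in paths:
--         if path[1] == check:
--             p = probs[path[0]]
--             if best_p is None or p > best_p:
--                 best_p = p
--                 check2 = path[0]
--     prediction[check2] = True
--     return prediction
-- ===== SOURCE B (Python) =====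
-- def select_argmax_autoreg(prediction, probs, label_ids, paths):
--     # One pass: bucket path[0]s by path[1] and track the best check simultaneously;
--     # then scan only the winning bucket. Mutates `prediction` in place like the original.
--     buckets = {}
--     best = None  # (probability, its path[1]), first strict maximum
--     for path in paths:
--         buckets.setdefault(path[1], []).append(path[0])
--         p = probs[path[1]]
--         if best is None or p > best[0]:
--             best = (p, path[1])
--     check = None if best is None else best[1]
--     prediction[check] = True
--
--     check2 = None
--     bp = None
--     for head in buckets.get(check, []):
--         p = probs[head]
--         if bp is None or p > bp:
--             bp = p
--             check2 = head
--     prediction[check2] = True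
--     return prediction
-- ===== Notes on version B (the rewrite author's own statement) =====
-- stated objective: alternative
-- what changed: B replaces A's two full scans over paths by a single pass that builds a dict bucketing path[0]s under each path[1] while tracking the best check, then scans only the winning bucket (reading probs[path[0]] only there, as A does).
-- outside the precondition, e.g. on select_argmax_autoreg({}, [], [], []): A returns {None: True}, B returns {None: True}
import Mathlib
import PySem

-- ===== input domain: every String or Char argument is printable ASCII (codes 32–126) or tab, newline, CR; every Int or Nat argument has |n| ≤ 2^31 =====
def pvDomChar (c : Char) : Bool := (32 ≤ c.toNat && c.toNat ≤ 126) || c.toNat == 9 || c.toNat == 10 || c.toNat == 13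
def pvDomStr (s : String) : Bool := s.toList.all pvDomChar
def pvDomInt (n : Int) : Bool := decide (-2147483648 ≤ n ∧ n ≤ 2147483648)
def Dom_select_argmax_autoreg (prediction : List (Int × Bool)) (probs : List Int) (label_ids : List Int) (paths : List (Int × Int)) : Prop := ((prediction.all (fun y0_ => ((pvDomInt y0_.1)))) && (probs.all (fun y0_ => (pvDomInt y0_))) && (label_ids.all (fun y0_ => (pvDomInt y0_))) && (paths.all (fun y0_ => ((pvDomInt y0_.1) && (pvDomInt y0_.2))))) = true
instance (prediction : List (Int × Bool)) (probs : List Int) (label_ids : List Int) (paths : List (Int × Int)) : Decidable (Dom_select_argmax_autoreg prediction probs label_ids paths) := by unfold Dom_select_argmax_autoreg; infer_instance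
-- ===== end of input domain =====

-- B builds, in ONE pass, a dict bucketing the path[0]s under each path[1] while tracking the
-- best check, then scans only the winning bucket (instead of A's second full scan over paths);
-- equivalence is about the RETURN value (both mutate `prediction` identically in Python).

-- ===== PORT A =====
-- A-side helper: the body of A's `if best_p is None or p > best_p` update, for index i
-- (probs[i] ported as pyGetD, exact when the index is in range — guaranteed by Pre_).
def pvA_arg (probs : List Int) (st : Option Int × Option Int) (i : Int) : Option Int × Option Int :=
  let p := PySem.List.pyGetD probs i 0
  match st.1 with
  | none => (some p, some i)
  | some b => if p > b then (some p, some i) else st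

def select_argmax_autoreg (prediction : List (Int × Bool)) (probs : List Int) (label_ids : List Int) (paths : List (Int × Int)) : List (Int × Bool) :=
  -- first loop: best_p/check over probs[path[1]]
  let s1 := paths.foldl (fun st path => pvA_arg probs st path.2) ((none, none) : Option Int × Option Int)
  -- prediction[check] = True  (check = None, i.e. empty paths, is excluded by Pre_: the None key leaves dict[int,bool])
  let pred1 := match s1.2 with
    | some c => (PySem.Dict.mk prediction).insert c true
    | none => PySem.Dict.mk prediction
  -- second loop: best_p/check2 over probs[path[0]] for paths with path[1] == check
  let s2 := paths.foldl (fun st path => if some path.2 = s1.2 then pvA_arg probs st path.1 else st) ((none, none) : Option Int × Option Int)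
  (match s2.2 with
   | some c2 => pred1.insert c2 true
   | none => pred1).items

-- ===== PORT B =====
-- B-side helpers: the best-(p, check) update and the bucket-scan update of Source B.
def pvB_best (probs : List Int) (b : Option (Int × Int)) (path : Int × Int) : Option (Int × Int) :=
  let p := PySem.List.pyGetD probs path.2 0
  match b with
  | none => some (p, path.2)
  | some x => if p > x.1 then some (p, path.2) else b

def pvB_scan (probs : List Int) (st : Option Int × Option Int) (head : Int) : Option Int × Option Int :=
  let p := PySem.List.pyGetD probs head 0
  match st.1 with
  | none => (some p, some head)
  | some b => if p > b then (some p, some head) else st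

def select_argmax_autoreg_alt (prediction : List (Int × Bool)) (probs : List Int) (label_ids : List Int) (paths : List (Int × Int)) : List (Int × Bool) :=
  -- one pass: buckets.setdefault(path[1], []).append(path[0]) and the running best (p, path[1])
  let st := paths.foldl
    (fun (st : PySem.Dict Int (List Int) × Option (Int × Int)) path =>
      (st.1.modify path.2 [] (fun l => l ++ [path.1]), pvB_best probs st.2 path))
    (PySem.Dict.empty, none)
  let check := st.2.map Prod.snd
  -- prediction[check] = True  (check = None excluded by Pre_)
  let pred1 := match check with
    | some c => (PySem.Dict.mk prediction).insert c true
    | none => PySem.Dict.mk prediction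
  -- scan buckets.get(check, []) for the best probs[head]
  let s2 := (match check with
    | some c => st.1.getD c []
    | none => ([] : List Int)).foldl (fun st head => pvB_scan probs st head) ((none, none) : Option Int × Option Int)
  (match s2.2 with
   | some c2 => pred1.insert c2 true
   | none => pred1).items

-- ===== PRECONDITION & SPEC =====
-- Pre_ excludes exactly the inputs where Python A raises (an IndexError on probs[path[1]], or on
-- probs[path[0]] for a path in the winning bucket) or returns a dict keyed by None (empty paths),
-- which is not a value of dict[int, bool]; B behaves identically to A on all of them.
def Pre_select_argmax_autoreg (prediction : List (Int × Bool)) (probs : List Int) (label_ids : List Int) (paths : List (Int × Int)) : Prop :=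
  paths ≠ [] ∧
  (∀ p ∈ paths, PySem.Raise.InRange probs.length p.2) ∧
  (∀ p ∈ paths,
    (List.find? (fun q => PySem.List.pyGetD probs q.2 0 == ((paths.map (fun q => PySem.List.pyGetD probs q.2 0)).max?.getD 0)) paths).map Prod.snd = some p.2 →
    PySem.Raise.InRange probs.length p.1)
instance (prediction : List (Int × Bool)) (probs : List Int) (label_ids : List Int) (paths : List (Int × Int)) : Decidable (Pre_select_argmax_autoreg prediction probs label_ids paths) := by unfold Pre_select_argmax_autoreg; infer_instance

def pvWitness_select_argmax_autoreg : (List (Int × Bool)) × List Int × List Int × (List (Int × Int)) := ([], [5, 3], [], [(0, 1)])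

def Spec_select_argmax_autoreg (prediction : List (Int × Bool)) (probs : List Int) (label_ids : List Int) (paths : List (Int × Int)) (out : List (Int × Bool)) : Prop := out = select_argmax_autoreg_alt prediction probs label_ids paths
instance (prediction : List (Int × Bool)) (probs : List Int) (label_ids : List Int) (paths : List (Int × Int)) (out : List (Int × Bool)) : Decidable (Spec_select_argmax_autoreg prediction probs label_ids paths out) := by unfold Spec_select_argmax_autoreg; infer_instance

-- ===== CLAIM (what is proved, stated in full; the proofs are below) =====
def Claim_equal_select_argmax_autoreg : Prop := ∀ (prediction : List (Int × Bool)) (probs : List Int) (label_ids : List Int) (paths : List (Int × Int)), Dom_select_argmax_autoreg prediction probs label_ids paths → Pre_select_argmax_autoreg prediction probs label_ids paths → Spec_select_argmax_autoreg prediction probs label_ids paths (select_argmax_autoreg prediction probs label_ids paths)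

-- ===== LEMMAS AND PROOFS =====

-- B's combined fold splits into the bucket fold and the best fold.
theorem pv_split (probs : List Int) (l : List (Int × Int)) (d : PySem.Dict Int (List Int)) (b : Option (Int × Int)) :
    List.foldl (fun (st : PySem.Dict Int (List Int) × Option (Int × Int)) path =>
      (st.1.modify path.2 [] (fun t => t ++ [path.1]), pvB_best probs st.2 path)) (d, b) l
    = (List.foldl (fun d path => PySem.Dict.modify d path.2 [] (fun t => t ++ [path.1])) d l,
       List.foldl (pvB_best probs) b l) := by
  induction l generalizing d b with
  | nil => rfl
  | cons p t ih => simp [List.foldl_cons, ih]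

-- A's first loop equals the projections of B's best fold.
theorem pv_best_eq (probs : List Int) (l : List (Int × Int)) (b : Option (Int × Int)) :
    List.foldl (fun st path => pvA_arg probs st path.2) (Option.map Prod.fst b, Option.map Prod.snd b) l
    = (Option.map Prod.fst (List.foldl (pvB_best probs) b l),
       Option.map Prod.snd (List.foldl (pvB_best probs) b l)) := by
  induction l generalizing b with
  | nil => rfl
  | cons p t ih =>
    have h : pvA_arg probs (Option.map Prod.fst b, Option.map Prod.snd b) p.2
        = (Option.map Prod.fst (pvB_best probs b p), Option.map Prod.snd (pvB_best probs b p)) := by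
      cases b with
      | none => rfl
      | some x =>
        simp only [pvA_arg, pvB_best, Option.map_some]
        split <;> rfl
    rw [List.foldl_cons, h, ih, List.foldl_cons]

-- The bucket fold's entry at c collects the path[0]s of the paths with path[1] = c, in order.
theorem pv_bucket (l : List (Int × Int)) (d : PySem.Dict Int (List Int)) (c : Int) :
    (List.foldl (fun d path => PySem.Dict.modify d path.2 [] (fun t => t ++ [path.1])) d l).getD c []
    = d.getD c [] ++ (l.filter (fun p => p.2 == c)).map Prod.fst := by
  induction l generalizing d with
  | nil => simp
  | cons p t ih =>
    rw [List.foldl_cons, ih]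
    by_cases h : p.2 = c
    · simp [h]
    · simp [PySem.Dict.getD_modify, h, Ne.symm h]

-- A's argmax step and B's scan step coincide.
theorem pvA_arg_eq_scan (probs : List Int) (st : Option Int × Option Int) (i : Int) :
    pvA_arg probs st i = pvB_scan probs st i := rfl

-- A's guarded second loop is the bucket scan over exactly those path[0]s.
theorem pv_guard (probs : List Int) (c : Int) (l : List (Int × Int)) (acc : Option Int × Option Int) :
    List.foldl (fun st path => if path.2 = c then pvA_arg probs st path.1 else st) acc l
    = List.foldl (fun st head => pvB_scan probs st head) acc ((l.filter (fun p => p.2 == c)).map Prod.fst) := by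
  induction l generalizing acc with
  | nil => rfl
  | cons p t ih =>
    rw [List.foldl_cons, List.filter_cons]
    by_cases h : p.2 = c
    · rw [if_pos h, if_pos (beq_iff_eq.mpr h), List.map_cons, List.foldl_cons, ih, pvA_arg_eq_scan]
    · rw [if_neg h, if_neg (by simp [h]), ih]

-- With no winner the guard never fires.
theorem pv_guard_none (probs : List Int) (l : List (Int × Int)) (acc : Option Int × Option Int) :
    List.foldl (fun st path => if some path.2 = (none : Option Int) then pvA_arg probs st path.1 else st) acc l = acc := by
  induction l generalizing acc with
  | nil => rfl
  | cons p t ih => simpa using ih acc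

theorem pv_ports_eq (prediction : List (Int × Bool)) (probs : List Int) (label_ids : List Int) (paths : List (Int × Int)) :
    select_argmax_autoreg prediction probs label_ids paths = select_argmax_autoreg_alt prediction probs label_ids paths := by
  unfold select_argmax_autoreg select_argmax_autoreg_alt
  rw [pv_split]
  have h1 := pv_best_eq probs paths none
  cases hb : List.foldl (pvB_best probs) none paths with
  | none =>
    rw [hb] at h1
    simp only [Option.map_none] at h1 ⊢
    rw [h1]
    simp only [pv_guard_none, List.foldl_nil]
  | some r =>
    rw [hb] at h1
    simp only [Option.map_none, Option.map_some] at h1 ⊢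
    rw [h1]
    simp only [Option.some.injEq, pv_guard probs r.2 paths, pv_bucket, PySem.Dict.getD_empty,
      List.nil_append]

-- ===== VERDICT (by name: the statement is the Claim_ definition above) =====
theorem select_argmax_autoreg_spec : Claim_equal_select_argmax_autoreg := by
  intro prediction probs label_ids paths _ _
  unfold Spec_select_argmax_autoreg
  exact pv_ports_eq prediction probs label_ids paths
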